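-- pv_equiv track=rewrite | github.com/catalinakim/algorism | itcote/dfs_bfs/13-18bracket.py | solution
-- ===== SOURCE A (Python) =====
-- def solution(p):
--     answer = ''
--
--     if p == '':
--         return ''
--
--     def divUV(s):
--         # u: 균형잡힌, 더이상 분리 불가
--         # v: 빈 문자열 가능
--         L, R = 0, 0
--         for i in range(len(s)):
--             if s[i] == '(':
--                 L += 1
--             else:
--                 R += 1
--             if L == R: # 균형맞음
--                 break
--         return s[:L+R], s[L+R:]
--
--     def isRight(u):
--         L, R = 0, 0
--         for i in u:
--             if i == '(':
--                 L += 1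
--             else:
--                 R += 1
--             if L < R:
--                 return False
--         return True
--
--     u, v = divUV(p)
--
--     # 3번 조건
--     if isRight(u):
--         return u + solution(v)
--     # 4번 조건
--     else:
--         answer += '('
--         answer += solution(v) + ')'
--         newU = u[1:-1]
--         for i in newU:
--             if i == '(':
--                 answer += ')'
--             else:
--                 answer += '('
--
--     return answer
-- ===== SOURCE B (Python) =====
-- def solution(p):
--     # Split p into minimal "balanced-counter" chunks, then fold them right-to-left.
--     def chunks(s):
--         out = []
--         while s:
--             bal = 0
--             for i, ch in enumerate(s):
--                 bal += 1 if ch == '(' else -1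
--                 if bal == 0:
--                     break
--             n = i + 1
--             out.append(s[:n])
--             s = s[n:]
--         return out
--
--     def correct(u):
--         bal = 0
--         for ch in u:
--             bal += 1 if ch == '(' else -1
--             if bal < 0:
--                 return False
--         return True
--
--     acc = ''
--     for u in reversed(chunks(p)):
--         if correct(u):
--             acc = u + acc
--         else:
--             acc = '(' + acc + ')' + ''.join(')' if c == '(' else '(' for c in u[1:-1])
--     return acc
-- ===== Notes on version B (the rewrite author's own statement) =====
-- stated objective: alternative
-- what changed: A recurses on the remainder after splitting off the first balanced chunk; B first splits the whole string into the ordered list of minimal balanced chunks, then builds the answer with a single iterative right-to-left fold over that list.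
import Mathlib
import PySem

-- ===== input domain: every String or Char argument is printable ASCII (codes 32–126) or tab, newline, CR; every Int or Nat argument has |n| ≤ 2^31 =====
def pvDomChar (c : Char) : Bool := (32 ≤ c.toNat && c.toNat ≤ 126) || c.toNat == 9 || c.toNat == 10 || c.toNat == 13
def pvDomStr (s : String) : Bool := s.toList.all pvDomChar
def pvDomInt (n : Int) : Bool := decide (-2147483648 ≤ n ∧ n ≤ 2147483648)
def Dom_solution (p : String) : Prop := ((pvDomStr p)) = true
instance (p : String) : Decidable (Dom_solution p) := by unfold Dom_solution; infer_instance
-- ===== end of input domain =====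

-- B replaces A's recursion-on-the-remainder by an explicit chunk list plus an iterative right-to-left fold (objective: alternative decomposition).

-- ===== PORT A =====
-- divUV's counter loop: returns L+R at the break point (k is the running count of consumed chars)
def divLen : List Char → Int → Int → Nat → Nat
  | [], _, _, k => k
  | c :: rest, L, R, k =>
    let L' := if c = '(' then L + 1 else L
    let R' := if c = '(' then R else R + 1
    if L' = R' then k + 1 else divLen rest L' R' (k + 1)

-- cited by solAux's decreasing_by
lemma divLen_ge : ∀ (s : List Char) (L R : Int) (k : Nat), k ≤ divLen s L R k := by
  intro s
  induction s with
  | nil => intro L R k; simp [divLen]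
  | cons c rest ih =>
    intro L R k
    simp only [divLen]
    split_ifs <;> first | omega | exact le_trans (by omega) (ih _ _ (k + 1))

def isRightA : List Char → Int → Int → Bool
  | [], _, _ => true
  | c :: rest, L, R =>
    let L' := if c = '(' then L + 1 else L
    let R' := if c = '(' then R else R + 1
    if L' < R' then false else isRightA rest L' R'

-- recursion of A's solution, over the char list; u[1:-1] ported as (drop 1).dropLast
-- cited by solAux's decreasing_by
lemma divLen_cons_pos (c : Char) (rest : List Char) (L R : Int) (k : Nat) :
    k < divLen (c :: rest) L R k := by
  simp only [divLen]
  split_ifs <;> first | omega | exact lt_of_lt_of_le (by omega) (divLen_ge rest _ _ (k + 1))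

def solAux (s : List Char) : List Char :=
  match s with
  | [] => []
  | c :: rest =>
    let n := divLen (c :: rest) 0 0 0
    let u := (c :: rest).take n
    let v := (c :: rest).drop n
    if isRightA u 0 0 then u ++ solAux v
    else (u.drop 1).dropLast.foldl
      (fun a ch => a ++ [if ch = '(' then ')' else '(']) ('(' :: (solAux v ++ [')']))
termination_by s.length
decreasing_by
  all_goals
    have h1 := divLen_cons_pos c rest 0 0 0
    simp only [List.length_drop, List.length_cons]
    omega

def solution (p : String) : String :=
  if p = "" then "" else String.mk (solAux p.toList)

-- ===== PORT B =====
def balLen : List Char → Int → Nat → Nat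
  | [], _, k => k
  | c :: rest, bal, k =>
    let bal' := bal + (if c = '(' then 1 else -1)
    if bal' = 0 then k + 1 else balLen rest bal' (k + 1)

-- cited by chunksB's decreasing_by
lemma balLen_ge : ∀ (s : List Char) (bal : Int) (k : Nat), k ≤ balLen s bal k := by
  intro s
  induction s with
  | nil => intro bal k; simp [balLen]
  | cons c rest ih =>
    intro bal k
    simp only [balLen]
    split_ifs <;> first | omega | exact le_trans (by omega) (ih _ (k + 1))

def chunksB (s : List Char) : List (List Char) :=
  match s with
  | [] => []
  | c :: rest =>
    let n := balLen (c :: rest) 0 0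
    (c :: rest).take n :: chunksB ((c :: rest).drop n)
termination_by s.length
decreasing_by
  all_goals
    have h1 : 1 ≤ balLen (c :: rest) 0 0 := by
      simp only [balLen]
      split_ifs <;> first | omega | exact le_trans (by omega) (balLen_ge rest _ 1)
    simp only [List.length_drop, List.length_cons]
    omega

def correctB : List Char → Int → Bool
  | [], _ => true
  | c :: rest, bal =>
    let bal' := bal + (if c = '(' then 1 else -1)
    if bal' < 0 then false else correctB rest bal'

def combB (u acc : List Char) : List Char :=
  if correctB u 0 then u ++ acc
  else '(' :: acc ++ [')'] ++ (u.drop 1).dropLast.map (fun c => if c = '(' then ')' else '(')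

def solution_alt (p : String) : String :=
  String.mk ((chunksB p.toList).reverse.foldl (fun acc u => combB u acc) [])

-- ===== PRECONDITION & SPEC =====
def Spec_solution (p : String) (out : String) : Prop := out = solution_alt p
instance (p : String) (out : String) : Decidable (Spec_solution p out) := by unfold Spec_solution; infer_instance

-- ===== CLAIM (what is proved, stated in full; the proofs are below) =====
def Claim_equal_solution : Prop := ∀ (p : String), Dom_solution p → Spec_solution p (solution p)

-- ===== LEMMAS AND PROOFS =====

lemma divLen_eq_balLen : ∀ (s : List Char) (L R : Int) (k : Nat),
    divLen s L R k = balLen s (L - R) k := by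
  intro s
  induction s with
  | nil => intro L R k; simp [divLen, balLen]
  | cons c rest ih =>
    intro L R k
    simp only [divLen, balLen]
    split_ifs <;>
      first
        | rfl
        | omega
        | (rw [ih]; congr 1; ring)

lemma isRightA_eq_correctB : ∀ (u : List Char) (L R : Int),
    isRightA u L R = correctB u (L - R) := by
  intro u
  induction u with
  | nil => intro L R; simp [isRightA, correctB]
  | cons c rest ih =>
    intro L R
    simp only [isRightA, correctB]
    split_ifs <;>
      first
        | rfl
        | omega
        | (rw [ih]; congr 1; ring)

lemma foldl_append_map (f : Char → Char) :
    ∀ (l a : List Char), l.foldl (fun a c => a ++ [f c]) a = a ++ l.map f := by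
  intro l
  induction l with
  | nil => simp
  | cons c rest ih => intro a; simp [List.foldl, ih]

lemma solAux_eq_foldr : ∀ (N : Nat) (s : List Char), s.length ≤ N →
    solAux s = (chunksB s).foldr combB [] := by
  intro N
  induction N with
  | zero =>
    intro s hs
    have : s = [] := List.eq_nil_of_length_eq_zero (by omega)
    subst this; simp [solAux, chunksB]
  | succ N ih =>
    intro s hs
    cases s with
    | nil => simp [solAux, chunksB]
    | cons c rest =>
      have h1 : 1 ≤ divLen (c :: rest) 0 0 0 := by
        simp only [divLen]
        split_ifs <;> first | omega | exact le_trans (by omega) (divLen_ge rest _ _ 1)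
      have hn : balLen (c :: rest) 0 0 = divLen (c :: rest) 0 0 0 := by
        rw [divLen_eq_balLen]; norm_num
      have hv : ((c :: rest).drop (divLen (c :: rest) 0 0 0)).length ≤ N := by
        simp only [List.length_drop, List.length_cons]
        simp only [List.length_cons] at hs
        omega
      rw [solAux, chunksB]
      simp only [List.foldr_cons, hn]
      rw [ih _ hv]
      unfold combB
      rw [isRightA_eq_correctB]
      rw [show (0 : Int) - 0 = 0 by ring]
      by_cases hc : correctB ((c :: rest).take (divLen (c :: rest) 0 0 0)) 0
      · rw [if_pos hc, if_pos hc]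
      · rw [if_neg hc, if_neg hc]
        rw [foldl_append_map]
        simp [List.append_assoc]

lemma solution_eq (p : String) : solution p = solution_alt p := by
  unfold solution solution_alt
  rw [List.foldl_reverse]
  rw [show (fun (x : List Char) (y : List Char) => (fun acc u => combB u acc) y x) = combB from rfl]
  rw [← solAux_eq_foldr p.toList.length p.toList le_rfl]
  split
  · rename_i hp
    subst hp
    simp [solAux]
    rfl
  · rfl

-- ===== VERDICT (by name: the statement is the Claim_ definition above) =====
theorem solution_spec : Claim_equal_solution := by
  intro p _
  unfold Spec_solution
  exact solution_eq p
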